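-- pv_equiv track=rewrite | github.com/Evanshu24/adobe_hackathon | APIs.py | _find_document_title
-- ===== SOURCE A (Python) =====
-- def _find_document_title(outline: list) -> str:
--     """
--     Selects the most appropriate title from the final outline.
--     """
--     if not outline:
--         return "Untitled"
--
--     # Default to the very first heading as a fallback.
--     title = outline[0]["text"]
--
--     # Search for the highest-ranking heading (H1, then H2) to use as the title.
--     for level in ["H1", "H2"]:
--         found_title = next((item["text"] for item in outline if item["level"] == level), None)
--         if found_title:
--             title = found_title
--             return title # Return as soon as the best level is found.
--
--     return title
-- ===== SOURCE B (Python) =====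
-- def _find_document_title(outline: list) -> str:
--     if not outline:
--         return "Untitled"
--     first = {}
--     for item in outline:
--         lvl = item.get("level")
--         if lvl in ("H1", "H2") and lvl not in first:
--             first[lvl] = item.get("text")
--     return first.get("H1") or first.get("H2") or outline[0]["text"]
-- ===== Notes on version B (the rewrite author's own statement) =====
-- stated objective: simpler
-- what changed: Replaced A's per-level next() scans (restarting from the front for H1 then H2) by ONE defensive pass that records the first text seen for each of H1/H2 in a dict, followed by an or-chain lookup first.get('H1') or first.get('H2') or outline[0]['text'].
import Mathlib
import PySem

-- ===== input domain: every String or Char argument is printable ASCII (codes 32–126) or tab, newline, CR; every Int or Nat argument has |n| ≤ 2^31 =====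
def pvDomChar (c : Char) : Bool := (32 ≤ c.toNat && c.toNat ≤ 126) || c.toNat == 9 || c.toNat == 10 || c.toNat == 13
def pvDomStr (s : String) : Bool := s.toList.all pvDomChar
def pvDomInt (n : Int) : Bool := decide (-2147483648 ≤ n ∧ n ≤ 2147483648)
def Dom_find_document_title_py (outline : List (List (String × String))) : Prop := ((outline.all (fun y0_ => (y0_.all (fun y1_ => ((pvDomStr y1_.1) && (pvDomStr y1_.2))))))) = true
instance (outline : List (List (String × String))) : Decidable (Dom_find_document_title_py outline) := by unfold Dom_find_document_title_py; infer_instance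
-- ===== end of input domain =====

-- B replaces A's two restarting next() scans (H1 then H2) by one pass building a
-- first-occurrence-per-level dict plus an or-chain lookup: simpler, single pass.

-- ===== PORT A =====
def find_document_title_py (outline : List (List (String × String))) : String :=
  match outline with
  | [] => "Untitled"
  | first :: rest =>
    -- title = outline[0]["text"]  (key present under Pre_; getD "" is exact there)
    let title := (PySem.Dict.mk first).getD "text" ""
    -- for level in ["H1","H2"]: found = next((item["text"] for item in outline if item["level"]==level), None); if found: return found
    let step : Option String → String → Option String := fun acc level =>
      match acc with
      | some t => some t
      | none =>
        match (first :: rest).find? (fun item => (PySem.Dict.mk item).getD "level" "" == level) with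
        | some item =>
          let found := (PySem.Dict.mk item).getD "text" ""
          if found ≠ "" then some found else none   -- 'if found_title:' — empty string is falsy
        | none => none
    match ["H1", "H2"].foldl step none with
    | some t => t
    | none => title

-- ===== PORT B =====
def find_document_title_py_alt (outline : List (List (String × String))) : String :=
  match outline with
  | [] => "Untitled"
  | first :: rest =>
    -- one pass: first[lvl] = item.get("text") for the FIRST occurrence of each of H1/H2
    -- (.get's None and "" are both falsy and the or-chain never tells them apart: getD "" is exact)
    let d := (first :: rest).foldl (fun (d : PySem.Dict String String) item =>
        let lvl := (PySem.Dict.mk item).getD "level" ""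
        if (lvl == "H1" || lvl == "H2") && !(d.contains lvl)
        then d.insert lvl ((PySem.Dict.mk item).getD "text" "")
        else d) PySem.Dict.empty
    -- return first.get("H1") or first.get("H2") or outline[0]["text"]
    let h1 := d.getD "H1" ""
    let h2 := d.getD "H2" ""
    if h1 ≠ "" then h1 else if h2 ≠ "" then h2 else (PySem.Dict.mk first).getD "text" ""

-- ===== PRECONDITION & SPEC =====
-- first entry that would stop A's next() scan for level L: it lacks "level" (KeyError) or its level is L
def pvStop_find_document_title (outline : List (List (String × String))) (L : String) : Option (List (String × String)) :=
  outline.find? (fun item => !((PySem.Dict.mk item).contains "level") || (PySem.Dict.mk item).getD "level" "" == L)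

def pvH2ok_find_document_title (outline : List (List (String × String))) : Bool :=
  match pvStop_find_document_title outline "H2" with
  | some item => (PySem.Dict.mk item).contains "level" && (PySem.Dict.mk item).contains "text"
  | none => true

-- Pre_ is exactly the outlines on which A returns (no KeyError): the first entry has a "text"
-- key, and each next() scan A actually runs stops at an entry that has a "level" key and,
-- when it matches, a "text" key (the H2 scan only runs if no H1 entry with nonempty text exists).
def Pre_find_document_title_py (outline : List (List (String × String))) : Prop :=
  (match outline with
   | [] => true
   | first :: _ =>
     (PySem.Dict.mk first).contains "text" &&
     (match pvStop_find_document_title outline "H1" with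
      | some item =>
        (PySem.Dict.mk item).contains "level" &&
        (PySem.Dict.mk item).contains "text" &&
        ((PySem.Dict.mk item).getD "text" "" != "" || pvH2ok_find_document_title outline)
      | none => pvH2ok_find_document_title outline)) = true
instance (outline : List (List (String × String))) : Decidable (Pre_find_document_title_py outline) := by unfold Pre_find_document_title_py; infer_instance
def pvWitness_find_document_title_py : (List (List (String × String))) :=
  [[("level", "H2"), ("text", "Intro")], [("level", "H1"), ("text", "Title")]]

def Spec_find_document_title_py (outline : List (List (String × String))) (out : String) : Prop := out = find_document_title_py_alt outline
instance (outline : List (List (String × String))) (out : String) : Decidable (Spec_find_document_title_py outline out) := by unfold Spec_find_document_title_py; infer_instance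

-- ===== CLAIM (what is proved, stated in full; the proofs are below) =====
def Claim_equal_find_document_title_py : Prop := ∀ (outline : List (List (String × String))), Dom_find_document_title_py outline → Pre_find_document_title_py outline → Spec_find_document_title_py outline (find_document_title_py outline)

-- ===== LEMMAS AND PROOFS =====

-- The dict built by B's one pass answers, for L ∈ {H1,H2}, exactly A's next()-scan:
-- its entry at L is the "text" of the first item whose "level" is L (if the start dict has none).
theorem get?_build (L : String) (hL : L = "H1" ∨ L = "H2")
    (xs : List (List (String × String))) (d0 : PySem.Dict String String) :
    PySem.Dict.get? (xs.foldl (fun (d : PySem.Dict String String) item =>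
        let lvl := (PySem.Dict.mk item).getD "level" ""
        if (lvl == "H1" || lvl == "H2") && !(d.contains lvl)
        then d.insert lvl ((PySem.Dict.mk item).getD "text" "")
        else d) d0) L =
      (PySem.Dict.get? d0 L).or
        ((xs.find? (fun item => (PySem.Dict.mk item).getD "level" "" == L)).map
          (fun item => (PySem.Dict.mk item).getD "text" "")) := by
  induction xs generalizing d0 with
  | nil => simp
  | cons it xs ih =>
    simp only [List.foldl_cons, List.find?_cons]
    by_cases hlv : (PySem.Dict.mk it).getD "level" "" = L
    · rw [hlv]
      by_cases hc : d0.contains L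
      · have hs : (PySem.Dict.get? d0 L).isSome := by
          rw [← PySem.Dict.contains_eq_isSome_get?]; exact hc
        obtain ⟨v, hv⟩ := Option.isSome_iff_exists.mp hs
        have hcond : ((L == "H1" || L == "H2") && !(d0.contains L)) = false := by
          simp [hc]
        simp only [hcond, Bool.false_eq_true, if_false]
        rw [ih]
        simp [hv]
      · have hcond : ((L == "H1" || L == "H2") && !(d0.contains L)) = true := by
          rcases hL with h | h <;> subst h <;> simp [eq_false_of_ne_true hc]
        have hn : PySem.Dict.get? d0 L = none := by
          cases hg : PySem.Dict.get? d0 L with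
          | none => rfl
          | some v =>
            exfalso; apply hc
            rw [PySem.Dict.contains_eq_isSome_get?, hg]; rfl
        simp only [hcond, if_true]
        rw [ih]
        simp [PySem.Dict.get?_insert_self, hn]
    · have hfind : ((PySem.Dict.mk it).getD "level" "" == L) = false := by
        simp [hlv]
      rw [hfind]
      by_cases hcond : (((PySem.Dict.mk it).getD "level" "" == "H1" ||
            (PySem.Dict.mk it).getD "level" "" == "H2") && !(d0.contains ((PySem.Dict.mk it).getD "level" ""))) = true
      · simp only [hcond, if_true, ih, PySem.Dict.get?_insert, if_neg (Ne.symm hlv)]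
      · simp only [eq_false_of_ne_true hcond, Bool.false_eq_true, if_false, ih]

theorem getD_build (L : String) (hL : L = "H1" ∨ L = "H2")
    (xs : List (List (String × String))) :
    PySem.Dict.getD (xs.foldl (fun (d : PySem.Dict String String) item =>
        let lvl := (PySem.Dict.mk item).getD "level" ""
        if (lvl == "H1" || lvl == "H2") && !(d.contains lvl)
        then d.insert lvl ((PySem.Dict.mk item).getD "text" "")
        else d) PySem.Dict.empty) L "" =
      ((xs.find? (fun item => (PySem.Dict.mk item).getD "level" "" == L)).map
          (fun item => (PySem.Dict.mk item).getD "text" "")).getD "" := by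
  rw [PySem.Dict.getD_eq_get?_getD, get?_build L hL xs PySem.Dict.empty]
  simp

-- ===== VERDICT (by name: the statement is the Claim_ definition above) =====
theorem find_document_title_py_spec : Claim_equal_find_document_title_py := by
  intro outline _ _
  unfold Spec_find_document_title_py find_document_title_py find_document_title_py_alt
  match outline with
  | [] => rfl
  | first :: rest =>
    simp only []
    rw [getD_build "H1" (Or.inl rfl), getD_build "H2" (Or.inr rfl)]
    cases hf1 : (first :: rest).find? (fun item => (PySem.Dict.mk item).getD "level" "" == "H1") with
    | some it1 =>
      simp only [List.foldl, Option.map_some, Option.getD_some]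
      by_cases h1 : (PySem.Dict.mk it1).getD "text" "" = ""
      · simp [hf1, h1]
        cases hf2 : (first :: rest).find? (fun item => (PySem.Dict.mk item).getD "level" "" == "H2") with
        | some it2 =>
          by_cases h2 : (PySem.Dict.mk it2).getD "text" "" = "" <;> simp [h2]
        | none => simp
      · simp [hf1, h1]
    | none =>
      simp only [List.foldl, Option.map_none, Option.getD_none]
      simp only [hf1]
      cases hf2 : (first :: rest).find? (fun item => (PySem.Dict.mk item).getD "level" "" == "H2") with
      | some it2 =>
        simp only [Option.map_some, Option.getD_some]
        by_cases h2 : (PySem.Dict.mk it2).getD "text" "" = "" <;> simp [h2]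
      | none => simp
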